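-- pv_equiv track=rewrite | github.com/IRS-JSSW/HDBResalePriceRecommender | HDBResaleWeb/PropertyGuruRetriever.py | summarizeFlatType
-- ===== SOURCE A (Python) =====
-- def summarizeFlatType(flattypePG):
--     """This function converts flat type in PG to flat type in DataGov. Include what is shown on search filter and individual listing
--
--     Args:
--         flattypePG (string): flat type used in PG
--
--     Returns:
--         key (string): flat type used in DG
--
--     """
--     dictFlatTypes = {"1 ROOM":["1R", "1-Room / Studio"], \
--                     "2 ROOM":["2A", "2I", "2S"], \
--                     "3 ROOM":["3A", "3NG", "3Am", "3NGm", "3I", "3Im", "3S", "3STD", "3NG (New Generation)", "3A (Modified)", "3NG (Modified)", "3I (Improved)", "3I (Modified)", "3S (Simplified)", "3STD (Standard)"], \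
--                     "4 ROOM":["4A", "4NG", "4S", "4I", "4STD", "4NG (New Generation)", "4S (Simplified)", "4I (Improved)", "4STD (Standard)"], \
--                     "5 ROOM":["5A", "5I", "5S"], \
--                     "JUMBO":["6J", "Jumbo"], \
--                     "EXECUTIVE":["EA", "EM", "EA (Exec Apartment)", "EM (Exec Maisonette)"], \
--                     "MULTI-GENERATION":["MG", "MG (Multi-Generation)"], \
--                     "TERRACE":["TE", "Terrace"]}
--
--     for key, value in dictFlatTypes.items():
--          if flattypePG in value:
--              return key
--
--     # Key does not exist
--     return ""
-- ===== SOURCE B (Python) =====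
-- # B computes the category from the code itself: validate against the flat set of
-- # known codes, then derive the category from the first character by rule
-- # (digit d -> "d ROOM", '6'/'J' -> JUMBO, 'E' -> EXECUTIVE, 'M' -> MULTI-GENERATION,
-- # 'T' -> TERRACE). No category strings are stored per code and no bucket is scanned.
-- _VALID_CODES = frozenset([
--     "1R", "1-Room / Studio",
--     "2A", "2I", "2S",
--     "3A", "3NG", "3Am", "3NGm", "3I", "3Im", "3S", "3STD",
--     "3NG (New Generation)", "3A (Modified)", "3NG (Modified)", "3I (Improved)",
--     "3I (Modified)", "3S (Simplified)", "3STD (Standard)",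
--     "4A", "4NG", "4S", "4I", "4STD",
--     "4NG (New Generation)", "4S (Simplified)", "4I (Improved)", "4STD (Standard)",
--     "5A", "5I", "5S",
--     "6J", "Jumbo",
--     "EA", "EM", "EA (Exec Apartment)", "EM (Exec Maisonette)",
--     "MG", "MG (Multi-Generation)",
--     "TE", "Terrace",
-- ])
--
--
-- def summarizeFlatType(flattypePG):
--     if flattypePG not in _VALID_CODES:
--         return ""
--     c = flattypePG[0]
--     if c in "12345":
--         return c + " ROOM"
--     if c in "6J":
--         return "JUMBO"
--     if c == "E":
--         return "EXECUTIVE"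
--     if c == "M":
--         return "MULTI-GENERATION"
--     return "TERRACE"
-- ===== Notes on version B (the rewrite author's own statement) =====
-- stated objective: alternative
-- what changed: Instead of scanning nine category buckets for membership, B validates the input against one flat set of known codes and then derives the category from the code's first character by rule (digit d -> 'd ROOM', 6/J -> JUMBO, E -> EXECUTIVE, M -> MULTI-GENERATION, T -> TERRACE), so no category string is stored per code and no bucket loop exists.
import Mathlib
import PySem

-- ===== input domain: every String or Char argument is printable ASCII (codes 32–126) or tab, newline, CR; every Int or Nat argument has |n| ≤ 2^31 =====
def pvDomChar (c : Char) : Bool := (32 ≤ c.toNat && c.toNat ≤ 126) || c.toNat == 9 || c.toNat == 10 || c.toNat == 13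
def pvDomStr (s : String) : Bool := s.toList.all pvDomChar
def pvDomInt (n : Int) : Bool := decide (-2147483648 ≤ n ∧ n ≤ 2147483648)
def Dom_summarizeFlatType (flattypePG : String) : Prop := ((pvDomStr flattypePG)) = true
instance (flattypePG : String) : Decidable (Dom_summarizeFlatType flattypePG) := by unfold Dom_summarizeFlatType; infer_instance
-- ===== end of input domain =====

-- B validates the code against the flat set of known codes and then COMPUTES the
-- category from the code's first character by rule, instead of scanning stored
-- category buckets (objective: alternative).

-- ===== PORT A =====
-- the dict literal of A, as an insertion-ordered association list
def dictFlatTypes : List (String × List String) := [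
  ("1 ROOM", ["1R", "1-Room / Studio"]),
  ("2 ROOM", ["2A", "2I", "2S"]),
  ("3 ROOM", ["3A", "3NG", "3Am", "3NGm", "3I", "3Im", "3S", "3STD", "3NG (New Generation)", "3A (Modified)", "3NG (Modified)", "3I (Improved)", "3I (Modified)", "3S (Simplified)", "3STD (Standard)"]),
  ("4 ROOM", ["4A", "4NG", "4S", "4I", "4STD", "4NG (New Generation)", "4S (Simplified)", "4I (Improved)", "4STD (Standard)"]),
  ("5 ROOM", ["5A", "5I", "5S"]),
  ("JUMBO", ["6J", "Jumbo"]),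
  ("EXECUTIVE", ["EA", "EM", "EA (Exec Apartment)", "EM (Exec Maisonette)"]),
  ("MULTI-GENERATION", ["MG", "MG (Multi-Generation)"]),
  ("TERRACE", ["TE", "Terrace"])]

-- A's `for key, value in dictFlatTypes.items(): if flattypePG in value: return key` / `return ""`
def goA : List (String × List String) → String → String
  | [], _ => ""
  | (k, v) :: rest, s => if v.contains s then k else goA rest s

def summarizeFlatType (flattypePG : String) : String := goA dictFlatTypes flattypePG

-- ===== PORT B =====
-- B's frozenset literal _VALID_CODES
def validCodes : PySem.Set String := PySem.Set.ofList [
  "1R", "1-Room / Studio",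
  "2A", "2I", "2S",
  "3A", "3NG", "3Am", "3NGm", "3I", "3Im", "3S", "3STD",
  "3NG (New Generation)", "3A (Modified)", "3NG (Modified)", "3I (Improved)",
  "3I (Modified)", "3S (Simplified)", "3STD (Standard)",
  "4A", "4NG", "4S", "4I", "4STD",
  "4NG (New Generation)", "4S (Simplified)", "4I (Improved)", "4STD (Standard)",
  "5A", "5I", "5S",
  "6J", "Jumbo",
  "EA", "EM", "EA (Exec Apartment)", "EM (Exec Maisonette)",
  "MG", "MG (Multi-Generation)",
  "TE", "Terrace"]

-- membership guard, then `c = flattypePG[0]` and the first-character rules;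
-- the [] branch is unreachable (every valid code is nonempty) and only makes the match total
def summarizeFlatType_alt (flattypePG : String) : String :=
  if !(PySem.Set.contains validCodes flattypePG) then ""
  else
    match flattypePG.toList with
    | [] => ""
    | c :: _ =>
      if "12345".toList.contains c then String.ofList [c] ++ " ROOM"
      else if "6J".toList.contains c then "JUMBO"
      else if c == 'E' then "EXECUTIVE"
      else if c == 'M' then "MULTI-GENERATION"
      else "TERRACE"

-- ===== PRECONDITION & SPEC =====
def Spec_summarizeFlatType (flattypePG : String) (out : String) : Prop := out = summarizeFlatType_alt flattypePG
instance (flattypePG : String) (out : String) : Decidable (Spec_summarizeFlatType flattypePG out) := by unfold Spec_summarizeFlatType; infer_instance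

-- ===== CLAIM (what is proved, stated in full; the proofs are below) =====
def Claim_equal_summarizeFlatType : Prop := ∀ (flattypePG : String), Dom_summarizeFlatType flattypePG → Spec_summarizeFlatType flattypePG (summarizeFlatType flattypePG)

-- ===== LEMMAS AND PROOFS =====

-- the flat list of all codes, in A's scan order
def codeList : List String := [
  "1R", "1-Room / Studio",
  "2A", "2I", "2S",
  "3A", "3NG", "3Am", "3NGm", "3I", "3Im", "3S", "3STD",
  "3NG (New Generation)", "3A (Modified)", "3NG (Modified)", "3I (Improved)",
  "3I (Modified)", "3S (Simplified)", "3STD (Standard)",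
  "4A", "4NG", "4S", "4I", "4STD",
  "4NG (New Generation)", "4S (Simplified)", "4I (Improved)", "4STD (Standard)",
  "5A", "5I", "5S",
  "6J", "Jumbo",
  "EA", "EM", "EA (Exec Apartment)", "EM (Exec Maisonette)",
  "MG", "MG (Multi-Generation)",
  "TE", "Terrace"]

-- on every known code the two ports agree (finite check)
set_option maxRecDepth 100000 in
theorem eq_on_codes : ∀ s ∈ codeList, summarizeFlatType s = summarizeFlatType_alt s := by decide

-- every bucket of A's dict is contained in the flat code list
set_option maxRecDepth 100000 in
theorem buckets_sub : ∀ kv ∈ dictFlatTypes, ∀ x ∈ kv.2, x ∈ codeList := by decide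

-- A returns "" when no bucket of `data` contains s
theorem goA_eq_empty (data : List (String × List String)) (s : String)
    (h : ∀ kv ∈ data, s ∉ kv.2) : goA data s = "" := by
  induction data with
  | nil => rfl
  | cons kv rest ih =>
    obtain ⟨k, v⟩ := kv
    have hv : s ∉ v := h (k, v) (List.mem_cons_self ..)
    have hc : v.contains s = false := by
      rw [List.contains_eq_mem]
      exact decide_eq_false hv
    show (if v.contains s then k else goA rest s) = ""
    rw [hc]
    simpa using ih fun kv hkv => h kv (List.mem_cons_of_mem _ hkv)

-- ===== VERDICT (by name: the statement is the Claim_ definition above) =====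
theorem summarizeFlatType_spec : Claim_equal_summarizeFlatType := by
  intro s _
  show summarizeFlatType s = summarizeFlatType_alt s
  by_cases h : s ∈ codeList
  · exact eq_on_codes s h
  · have hA : summarizeFlatType s = "" :=
      goA_eq_empty dictFlatTypes s fun kv hkv hm => h (buckets_sub kv hkv s hm)
    have hcl : s ∈ validCodes → s ∈ codeList := by
      intro hm
      simp only [validCodes, PySem.Set.mem_ofList] at hm
      simpa only [codeList] using hm
    have hc : PySem.Set.contains validCodes s = false := by
      rw [Bool.eq_false_iff]
      intro hct
      exact h (hcl ((PySem.Set.contains_iff validCodes s).mp hct))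
    rw [hA]
    unfold summarizeFlatType_alt
    rw [hc]
    rfl
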